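-- pv_equiv track=rewrite | github.com/a-ksharma/Braille-Bot | afterrotate.py | preprocess_text_for_braille
-- ===== SOURCE A (Python) =====
-- def preprocess_text_for_braille(text):
--     processed_text = []
--     i = 0
--     while i < len(text):
--         if text[i].isdigit():
--             if i == 0 or text[i - 1] != '#':
--                 processed_text.append('#')
--         processed_text.append(text[i])
--         i += 1
--     return ''.join(processed_text)
-- ===== SOURCE B (Python) =====
-- def preprocess_text_for_braille(text):
--     # Tokenize left-to-right, consuming one or two characters per step:
--     # a '#' immediately followed by a digit is an already-marked digit and is
--     # copied as a pair; a bare digit gets a '#' prepended; anything else is copied.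
--     out = []
--     chars = list(text)
--     j = 0
--     n = len(chars)
--     while j < n:
--         c = chars[j]
--         if c == '#' and j + 1 < n and chars[j + 1].isdigit():
--             out.append('#')
--             out.append(chars[j + 1])
--             j += 2
--         elif c.isdigit():
--             out.append('#')
--             out.append(c)
--             j += 1
--         else:
--             out.append(c)
--             j += 1
--     return ''.join(out)
-- ===== Notes on version B (the rewrite author's own statement) =====
-- stated objective: alternative
-- what changed: Instead of A's lookbehind rule (check whether the previous original character is the marker), B tokenizes the string left-to-right consuming one or two characters per step: a marker-then-digit bigram is recognized and copied as an already-marked pair, a bare digit is emitted with a fresh marker, everything else is copied.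
import Mathlib
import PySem

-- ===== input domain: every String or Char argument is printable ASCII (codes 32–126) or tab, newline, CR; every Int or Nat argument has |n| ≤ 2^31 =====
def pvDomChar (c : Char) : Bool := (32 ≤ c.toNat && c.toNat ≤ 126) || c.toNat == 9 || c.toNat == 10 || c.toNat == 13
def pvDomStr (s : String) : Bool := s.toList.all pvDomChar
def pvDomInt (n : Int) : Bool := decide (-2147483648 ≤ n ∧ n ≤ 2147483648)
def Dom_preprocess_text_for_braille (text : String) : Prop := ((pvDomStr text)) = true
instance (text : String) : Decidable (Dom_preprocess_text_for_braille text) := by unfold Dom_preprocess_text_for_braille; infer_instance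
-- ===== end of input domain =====

-- B replaces A's lookbehind scan ("insert '#' unless the previous original character is '#'")
-- by a tokenizer that consumes one or two characters per step ('#digit' pairs copied verbatim,
-- bare digits marked): an alternative of the same cost, not claimed faster.

-- ===== PORT A =====
-- the while loop, index i and accumulator 'processed_text' kept as in A.
-- text[i].isdigit() is Char.isDigit: exact on the ASCII domain.
-- cs.getD (i-1) ' ' is text[i-1]; at i = 0 the first disjunct short-circuits as in Python.
def pvALoop (cs : List Char) (i : Nat) (acc : List Char) : List Char :=
  if h : i < cs.length then
    let acc2 := if cs[i].isDigit && (decide (i = 0) || (cs.getD (i-1) ' ' != '#'))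
                then acc ++ ['#'] else acc
    pvALoop cs (i+1) (acc2 ++ [cs[i]])
  else acc
termination_by cs.length - i

def preprocess_text_for_braille (text : String) : String :=
  String.ofList (pvALoop text.toList 0 [])

-- ===== PORT B =====
-- Source B's while loop advances by 2 on a '#digit' bigram and by 1 otherwise; as structural
-- recursion on the character list this is exactly consuming two or one elements per step.
def pvBGo : List Char → List Char
  | [] => []
  | [c] => if c.isDigit then ['#', c] else [c]
  | c :: c2 :: rest =>
    if c == '#' && c2.isDigit then '#' :: c2 :: pvBGo rest
    else if c.isDigit then '#' :: c :: pvBGo (c2 :: rest)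
    else c :: pvBGo (c2 :: rest)

def preprocess_text_for_braille_alt (text : String) : String :=
  String.ofList (pvBGo text.toList)

-- ===== PRECONDITION & SPEC =====
def Spec_preprocess_text_for_braille (text : String) (out : String) : Prop := out = preprocess_text_for_braille_alt text
instance (text : String) (out : String) : Decidable (Spec_preprocess_text_for_braille text out) := by unfold Spec_preprocess_text_for_braille; infer_instance

-- ===== CLAIM (what is proved, stated in full; the proofs are below) =====
def Claim_equal_preprocess_text_for_braille : Prop := ∀ (text : String), Dom_preprocess_text_for_braille text → Spec_preprocess_text_for_braille text (preprocess_text_for_braille text)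

-- ===== LEMMAS AND PROOFS =====

-- recursive reading of A's scan: p is the original previous character (none at position 0)
def pvGB (p : Option Char) : List Char → List Char
  | [] => []
  | c :: rest => (if c.isDigit && p != some '#' then ['#', c] else [c]) ++ pvGB (some c) rest

theorem pvALoop_append (cs : List Char) (i : Nat) (a b : List Char) :
    pvALoop cs i (a ++ b) = a ++ pvALoop cs i b := by
  induction h : cs.length - i using Nat.strong_induction_on generalizing i b with
  | _ n ih =>
    rw [pvALoop, pvALoop]
    split
    · next hlt =>
      have harg :
          (if cs[i].isDigit && (decide (i = 0) || cs.getD (i-1) ' ' != '#')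
            then (a ++ b) ++ ['#'] else a ++ b) ++ [cs[i]]
          = a ++ ((if cs[i].isDigit && (decide (i = 0) || cs.getD (i-1) ' ' != '#')
            then b ++ ['#'] else b) ++ [cs[i]]) := by
        split <;> simp
      dsimp only
      rw [harg, ih (cs.length - (i+1)) (by omega) (i+1) _ rfl]
    · rfl

theorem pvALoop_acc (cs : List Char) (i : Nat) (acc : List Char) :
    pvALoop cs i acc = acc ++ pvALoop cs i [] := by
  simpa using pvALoop_append cs i acc []

theorem pvALoop_drop (cs : List Char) (i : Nat) (p : Option Char)
    (hi : i ≤ cs.length)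
    (hp : p = if i = 0 then none else some (cs.getD (i-1) ' ')) :
    pvALoop cs i [] = pvGB p (cs.drop i) := by
  induction h : cs.length - i using Nat.strong_induction_on generalizing i p with
  | _ n ih =>
    rw [pvALoop]
    split
    · next hlt =>
      have hdrop : cs.drop i = cs[i] :: cs.drop (i+1) := List.drop_eq_getElem_cons hlt
      have hrec : pvALoop cs (i+1) [] = pvGB (some cs[i]) (cs.drop (i+1)) := by
        refine ih (cs.length - (i+1)) (by omega) (i+1) _ (by omega) ?_ rfl
        simp [List.getD_eq_getElem?_getD, hlt]
      have hcond : (decide (i = 0) || (cs.getD (i-1) ' ' != '#')) = (p != some '#') := by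
        rcases Nat.eq_zero_or_pos i with h0 | h0
        · subst h0; simp at hp; simp [hp]
        · have : ¬ i = 0 := by omega
          simp only [hp, if_neg this]
          simp [this, bne]
      rw [hdrop, pvGB, pvALoop_acc, hrec, hcond]
      split <;> simp
    · next hge =>
      have : i = cs.length := by omega
      simp [this, pvGB]

-- '#' is not a digit
theorem pvHashNotDigit : ('#'.isDigit) = false := by decide

theorem pvGB_eq_pvBGo : ∀ (cs : List Char) (p : Option Char), p ≠ some '#' → pvGB p cs = pvBGo cs := by
  intro cs
  induction hn : cs.length using Nat.strong_induction_on generalizing cs with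
  | _ n ih =>
    intro p hp
    have hpb : (p != some '#') = true := by simpa [bne_iff_ne] using hp
    match cs with
    | [] => rfl
    | [c] =>
      by_cases hc : c.isDigit
      · simp [pvGB, pvBGo, hc, hpb]
      · simp [pvGB, pvBGo, hc]
    | c :: c2 :: rest =>
      by_cases hc : c = '#'
      · subst hc
        by_cases h2 : c2.isDigit
        · have h2ne : (some c2 : Option Char) ≠ some '#' := by
            simp only [ne_eq, Option.some.injEq]
            rintro rfl; exact absurd h2 (by decide)
          have h1 := ih rest.length (by subst hn; simp only [List.length_cons]; omega) rest rfl (some c2) h2ne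
          simp [pvGB, pvBGo, h2, pvHashNotDigit, h1]
        · have hlen : (c2 :: rest).length < n := by subst hn; simp only [List.length_cons]; omega
          have h1 := ih _ hlen (c2 :: rest) rfl none (by simp)
          conv_rhs => rw [pvBGo]
          rw [← h1]
          simp [pvGB, h2, pvHashNotDigit]
      · have hcne : (some c : Option Char) ≠ some '#' := by
          simp only [ne_eq, Option.some.injEq]; exact hc
        have hlen : (c2 :: rest).length < n := by subst hn; simp only [List.length_cons]; omega
        have h1 := ih _ hlen (c2 :: rest) rfl (some c) hcne
        have hceq : (c == '#') = false := by simpa using hc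
        conv_lhs => rw [pvGB]
        rw [h1]
        by_cases hd : c.isDigit
        · simp [pvBGo, hd, hpb, hceq]
        · simp [pvBGo, hd, hceq]

theorem ports_agree (text : String) :
    preprocess_text_for_braille text = preprocess_text_for_braille_alt text := by
  unfold preprocess_text_for_braille preprocess_text_for_braille_alt
  rw [pvALoop_drop text.toList 0 none (by omega) (by simp), List.drop_zero,
      pvGB_eq_pvBGo text.toList none (by simp)]

-- ===== VERDICT (by name: the statement is the Claim_ definition above) =====
theorem preprocess_text_for_braille_spec : Claim_equal_preprocess_text_for_braille := by
  intro text _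
  exact ports_agree text
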